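-- pv_equiv track=rewrite | github.com/sergeylobachev/leetcode | Problems/790.py | solution
-- ===== SOURCE A (Python) =====
-- def solution(n):
--     if n == 1:
--         return 1
--     if n ==2:
--         return 2
--     dp = [0] * (n+1)
--     dp[1] = 1
--     dp[2] = 2
--     for i in range(3, len(dp)):
--         m = 0
--         for j in range(1, i):
--             m = max(m, dp[i-j] + dp[j])
--         dp[i] = m + 2
--
--     return dp[-1]
-- ===== SOURCE B (Python) =====
-- def solution(n):
--     if n == 1:
--         return 1
--     if n == 2:
--         return 2
--     return 3 * n - 4
-- ===== Notes on version B (the rewrite author's own statement) =====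
-- stated objective: faster
-- what changed: Replaced the O(n^2) DP table (max over all splits at each i) by the closed form 3n-4 for n>=3, proved equal to the DP's value.
import Mathlib
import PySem

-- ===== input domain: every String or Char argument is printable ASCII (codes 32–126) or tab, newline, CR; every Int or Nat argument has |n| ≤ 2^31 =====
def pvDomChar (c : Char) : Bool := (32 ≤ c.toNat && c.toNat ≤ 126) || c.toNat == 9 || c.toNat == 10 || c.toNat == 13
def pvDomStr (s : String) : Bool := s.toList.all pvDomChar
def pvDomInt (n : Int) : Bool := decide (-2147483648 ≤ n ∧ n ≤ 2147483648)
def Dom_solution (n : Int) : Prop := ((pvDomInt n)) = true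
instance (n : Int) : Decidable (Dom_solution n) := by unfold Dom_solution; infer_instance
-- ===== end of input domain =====

-- B replaces A's O(n^2) DP over all splits by the closed form 3n-4 for n >= 3 (measured asymptotically faster).


-- ===== PORT A =====
-- inner loop: m = 0; for j in range(1, i): m = max(m, dp[i-j] + dp[j])
def solutionInner (dp : List Int) (i : Int) : Int :=
  (PySem.List.pyRange 1 i 1).foldl
    (fun m j => max m (PySem.List.pyGetD dp (i - j) 0 + PySem.List.pyGetD dp j 0)) 0

def solution (n : Int) : Int :=
  if n = 1 then 1
  else if n = 2 then 2
  else
    let dp0 := PySem.List.pyRepeat [(0 : Int)] (n + 1)      -- dp = [0] * (n+1)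
    let dp1 := PySem.List.pySetD dp0 1 1                     -- dp[1] = 1  (IndexError excluded by Pre_)
    let dp2 := PySem.List.pySetD dp1 2 2                     -- dp[2] = 2
    let dp := (PySem.List.pyRange 3 (dp2.length : Int) 1).foldl
      (fun dp i => PySem.List.pySetD dp i (solutionInner dp i + 2)) dp2
    PySem.List.pyGetD dp (-1) 0                              -- dp[-1] (always in range under Pre_)

-- ===== PORT B =====
def solution_alt (n : Int) : Int :=
  if n = 1 then 1
  else if n = 2 then 2
  else 3 * n - 4

-- ===== PRECONDITION & SPEC =====
-- Pre_ excludes exactly n ≤ 0, where A raises IndexError at dp[1] = 1.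
def Pre_solution (n : Int) : Prop := 1 ≤ n
instance (n : Int) : Decidable (Pre_solution n) := by unfold Pre_solution; infer_instance
def pvWitness_solution : Int := 5


def Spec_solution (n : Int) (out : Int) : Prop := out = solution_alt n
instance (n : Int) (out : Int) : Decidable (Spec_solution n out) := by unfold Spec_solution; infer_instance

-- ===== CLAIM (what is proved, stated in full; the proofs are below) =====
def Claim_equal_solution : Prop := ∀ (n : Int), Dom_solution n → Pre_solution n → Spec_solution n (solution n)
-- ===== LEMMAS AND PROOFS =====

-- the DP's true values: fval j = dp[j] in the final table
def fval (j : Nat) : Int := if j = 0 then 0 else if j = 1 then 1 else if j = 2 then 2 else 3 * j - 4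

-- the table after processing indices 3..k (entries > k still 0, except the presets)
def mkdp (N k : Nat) : List Int :=
  (List.range (N + 1)).map (fun j => if j ≤ k then fval j else 0)

theorem length_mkdp (N k : Nat) : (mkdp N k).length = N + 1 := by
  simp [mkdp]

theorem fval_eq_of_two_le {t : Nat} (h : 2 ≤ t) : fval t = 3 * t - 4 := by
  unfold fval; split_ifs <;> omega

theorem fval_le {t : Nat} (h : 1 ≤ t) : fval t ≤ 3 * t - 2 := by
  unfold fval; split_ifs <;> omega

theorem mkdp_read {N k : Nat} (j : Int) (h0 : 0 ≤ j) (hk : j ≤ (k : Int)) (hN : k ≤ N) :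
    PySem.List.pyGetD (mkdp N k) j 0 = fval j.toNat := by
  rw [PySem.List.pyGetD_of_nonneg _ _ h0]
  rw [mkdp, List.getD_eq_getElem?_getD, List.getElem?_map, List.getElem?_range (by omega)]
  simp
  omega

theorem foldl_max_le {c : Int → Int} {m : Int} :
    ∀ l : List Int, (∀ j ∈ l, c j ≤ m) → l.foldl (fun m j => max m (c j)) m = m := by
  intro l
  induction l with
  | nil => intro _; rfl
  | cons a t ih =>
    intro h
    simp only [List.foldl_cons]
    rw [max_eq_left (h a (by simp))]
    exact ih (fun j hj => h j (by simp [hj]))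

theorem inner_eq {N : Nat} (k : Nat) (hk2 : 2 ≤ k) (hkN : k + 1 ≤ N) :
    solutionInner (mkdp N k) ((k : Int) + 1) = 3 * ((k : Int) + 1) - 6 := by
  unfold solutionInner
  have hread : ∀ j : Int, 1 ≤ j → j ≤ (k : Int) →
      PySem.List.pyGetD (mkdp N k) j 0 = fval j.toNat := by
    intro j hj1 hj2
    exact mkdp_read j (by omega) (by omega) (by omega)
  rw [PySem.List.pyRange_one_cons (by omega)]
  simp only [List.foldl_cons]
  rw [hread ((k : Int) + 1 - 1) (by omega) (by omega), hread 1 (by omega) (by omega)]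
  have ht : ((k : Int) + 1 - 1).toNat = k := by omega
  rw [ht, fval_eq_of_two_le hk2]
  have h1 : fval (1 : Int).toNat = 1 := by rfl
  rw [h1]
  rw [max_eq_right (by omega)]
  have hgoal : 3 * (k : Int) - 4 + 1 = 3 * ((k : Int) + 1) - 6 := by ring
  rw [hgoal]
  apply foldl_max_le (c := fun j =>
    PySem.List.pyGetD (mkdp N k) ((k : Int) + 1 - j) 0 + PySem.List.pyGetD (mkdp N k) j 0)
  intro j hj
  rw [PySem.List.mem_pyRange_one] at hj
  rw [hread ((k : Int) + 1 - j) (by omega) (by omega), hread j (by omega) (by omega)]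
  have ha := fval_eq_of_two_le (t := j.toNat) (by omega)
  have hb := fval_le (t := ((k : Int) + 1 - j).toNat) (by omega)
  rw [ha]
  omega

theorem mkdp_step {N : Nat} (k : Nat) (hk2 : 2 ≤ k) (hkN : k + 1 ≤ N) :
    PySem.List.pySetD (mkdp N k) ((k : Int) + 1)
      (solutionInner (mkdp N k) ((k : Int) + 1) + 2) = mkdp N (k + 1) := by
  rw [inner_eq k hk2 hkN]
  rw [PySem.List.pySetD_of_nonneg _ _ (by omega)]
  have ht : ((k : Int) + 1).toNat = k + 1 := by omega
  rw [ht]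
  apply List.ext_getElem
  · simp [mkdp]
  · intro t ht1 ht2
    simp only [mkdp, List.getElem_set, List.getElem_map, List.getElem_range]
    by_cases hti : k + 1 = t
    · rw [if_pos hti, ← hti, if_pos (le_refl (k + 1)), fval_eq_of_two_le (by omega)]
      push_cast
      ring
    · rw [if_neg hti]
      split_ifs <;> first | rfl | omega

theorem outer_fold {N : Nat} (c : Nat) (hc : 2 + c ≤ N) :
    (PySem.List.pyRange 3 (3 + (c : Int))).foldl
      (fun dp i => PySem.List.pySetD dp i (solutionInner dp i + 2)) (mkdp N 2)
      = mkdp N (2 + c) := by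
  induction c with
  | zero => simp [PySem.List.pyRange_one_eq_nil]
  | succ c ih =>
    have hcast : ((c + 1 : Nat) : Int) = (c : Int) + 1 := by push_cast; ring
    rw [hcast, show (3 : Int) + ((c : Int) + 1) = (3 + (c : Int)) + 1 by ring]
    rw [PySem.List.pyRange_one_succ_right (by omega), List.foldl_append, ih (by omega)]
    simp only [List.foldl_cons, List.foldl_nil]
    have he : (3 : Int) + (c : Int) = ((2 + c : Nat) : Int) + 1 := by push_cast; ring
    rw [he, mkdp_step (2 + c) (by omega) (by omega)]
    exact congrArg (mkdp N) (by omega)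

theorem mkdp_init (N : Nat) (hN : 3 ≤ N) :
    PySem.List.pySetD (PySem.List.pySetD (PySem.List.pyRepeat [(0 : Int)] ((N : Int) + 1)) 1 1) 2 2
      = mkdp N 2 := by
  rw [PySem.List.pySetD_of_nonneg _ _ (by omega), PySem.List.pySetD_of_nonneg _ _ (by omega)]
  rw [PySem.List.pyRepeat_singleton]
  have hrep : ((N : Int) + 1).toNat = N + 1 := by omega
  rw [hrep]
  apply List.ext_getElem
  · simp [mkdp]
  · intro t ht1 ht2
    simp only [mkdp, List.getElem_set, List.getElem_map, List.getElem_range,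
      List.getElem_replicate]
    unfold fval
    split_ifs <;> omega

theorem mkdp_last {N : Nat} (hN : 3 ≤ N) :
    PySem.List.pyGetD (mkdp N N) (-1) 0 = 3 * (N : Int) - 4 := by
  have hne : mkdp N N ≠ [] := by
    intro h
    have hl := length_mkdp N N
    rw [h] at hl; simp at hl
  rw [PySem.List.pyGetD_neg_one _ _ hne]
  have hlast : (mkdp N N).getLast hne = (mkdp N N)[N]'(by rw [length_mkdp]; omega) := by
    rw [List.getLast_eq_getElem]
    congr 1
    simp [length_mkdp]
  rw [hlast]
  simp only [mkdp, List.getElem_map, List.getElem_range]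
  rw [if_pos (le_refl _), fval_eq_of_two_le (by omega)]

-- ===== VERDICT =====
theorem solution_spec : Claim_equal_solution := by
  intro n hdom hpre
  unfold Spec_solution solution solution_alt
  by_cases h1 : n = 1
  · simp [h1]
  by_cases h2 : n = 2
  · simp [h2]
  rw [if_neg h1, if_neg h2, if_neg h1, if_neg h2]
  have hn3 : 3 ≤ n := by unfold Pre_solution at hpre; omega
  set N := n.toNat with hNdef
  have hnN : (N : Int) = n := by omega
  have hN3 : 3 ≤ N := by omega
  have hinit : PySem.List.pySetD (PySem.List.pySetD (PySem.List.pyRepeat [(0 : Int)] (n + 1)) 1 1) 2 2 = mkdp N 2 := by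
    rw [← hnN]
    exact mkdp_init N hN3
  dsimp only
  rw [hinit]
  have hlen : ((mkdp N 2).length : Int) = 3 + ((N - 2 : Nat) : Int) := by
    rw [length_mkdp]; omega
  rw [hlen, outer_fold (N - 2) (by omega)]
  have hfix : 2 + (N - 2) = N := by omega
  rw [hfix, mkdp_last hN3, hnN]
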